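-- pv_equiv track=rewrite | github.com/MrBrantCode/unitest_baseline | mut_generate/mist_train_taco/taco_14511/solution.py | minimum_colors_needed
-- ===== SOURCE A (Python) =====
-- def minimum_colors_needed(test_cases):
--     results = []
--     for n, a in test_cases:
--         maxf = 1
--         f = 1
--         for i in range(1, n):
--             if a[i] == a[i - 1]:
--                 f += 1
--             else:
--                 f = 1
--             if f > maxf:
--                 maxf = f
--         results.append(maxf)
--     return results
-- ===== SOURCE B (Python) =====
-- def minimum_colors_needed(test_cases):
--     results = []
--     for n, a in test_cases:
--         b = [0] + [i for i in range(1, n) if a[i] != a[i - 1]] + [n]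
--         diffs = [y - x for x, y in zip(b, b[1:])]
--         results.append(max([1] + diffs))
--     return results
-- ===== Notes on version B (the rewrite author's own statement) =====
-- stated objective: alternative
-- what changed: Replaces the running counter/maximum state machine with a boundary-index decomposition: collect the indices where the value changes, take consecutive differences as run lengths, and return their maximum (with 1 as floor).
import Mathlib
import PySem

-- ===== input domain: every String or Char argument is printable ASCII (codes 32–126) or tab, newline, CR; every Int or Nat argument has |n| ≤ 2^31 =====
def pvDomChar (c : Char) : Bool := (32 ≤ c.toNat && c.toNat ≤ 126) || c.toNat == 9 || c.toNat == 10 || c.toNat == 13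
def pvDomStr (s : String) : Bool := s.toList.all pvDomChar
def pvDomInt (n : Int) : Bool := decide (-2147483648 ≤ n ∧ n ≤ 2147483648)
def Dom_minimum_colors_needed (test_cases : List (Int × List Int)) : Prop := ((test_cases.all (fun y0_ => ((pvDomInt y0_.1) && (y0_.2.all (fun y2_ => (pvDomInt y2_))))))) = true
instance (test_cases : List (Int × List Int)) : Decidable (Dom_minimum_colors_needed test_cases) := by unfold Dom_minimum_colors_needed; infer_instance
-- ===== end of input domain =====

-- B replaces A's running counter/maximum state machine by a boundary-index decomposition
-- (change indices, consecutive differences, maximum); alternative algorithm, same cost.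

-- ===== PORT A =====
-- inner loop body of A: state (maxf, f), loop variable i
def pvStepA (a : List Int) (s : Int × Int) (i : Int) : Int × Int :=
  let f := if PySem.List.pyGetD a i 0 = PySem.List.pyGetD a (i - 1) 0 then s.2 + 1 else 1
  (if f > s.1 then f else s.1, f)

def minimum_colors_needed (test_cases : List (Int × List Int)) : List Int :=
  test_cases.foldl
    (fun results na =>
      results ++ [((PySem.List.pyRange 1 na.1 1).foldl (pvStepA na.2) (1, 1)).1]) []

-- ===== PORT B =====
-- Source B's boundary test  a[i] != a[i-1]
def pvBound (a : List Int) (i : Int) : Bool :=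
  PySem.List.pyGetD a i 0 ≠ PySem.List.pyGetD a (i - 1) 0

-- Source B's  [y - x for x, y in zip(b, b[1:])]
def pvDiffs (b : List Int) : List Int :=
  (b.zip b.tail).map (fun xy => xy.2 - xy.1)

-- one test case of Source B
def pvCaseB (n : Int) (a : List Int) : Int :=
  let b := 0 :: ((PySem.List.pyRange 1 n 1).filter (pvBound a) ++ [n])
  (pvDiffs b).foldl max 1

def minimum_colors_needed_alt (test_cases : List (Int × List Int)) : List Int :=
  test_cases.map (fun na => pvCaseB na.1 na.2)

-- ===== PRECONDITION & SPEC =====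
-- Pre_ excludes exactly the cases where the Python A raises IndexError: n ≥ 2 with n > len(a).
def Pre_minimum_colors_needed (test_cases : List (Int × List Int)) : Prop :=
  ∀ p ∈ test_cases, p.1 ≤ 1 ∨ p.1 ≤ (p.2.length : Int)
instance (test_cases : List (Int × List Int)) : Decidable (Pre_minimum_colors_needed test_cases) := by unfold Pre_minimum_colors_needed; infer_instance

def pvWitness_minimum_colors_needed : (List (Int × List Int)) := [(3, [1, 1, 2]), (0, []), (4, [5, 5, 5, 5])]

def Spec_minimum_colors_needed (test_cases : List (Int × List Int)) (out : List Int) : Prop := out = minimum_colors_needed_alt test_cases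
instance (test_cases : List (Int × List Int)) (out : List Int) : Decidable (Spec_minimum_colors_needed test_cases out) := by unfold Spec_minimum_colors_needed; infer_instance

-- ===== CLAIM (what is proved, stated in full; the proofs are below) =====
def Claim_equal_minimum_colors_needed : Prop := ∀ (test_cases : List (Int × List Int)), Dom_minimum_colors_needed test_cases → Pre_minimum_colors_needed test_cases → Spec_minimum_colors_needed test_cases (minimum_colors_needed test_cases)

-- ===== LEMMAS AND PROOFS =====

-- last element of a nonempty list (0 never used on the lists below, which are conses)
def pvLast (l : List Int) : Int := l.getLast?.getD 0

theorem pvLast_concat (l : List Int) (x : Int) : pvLast (l ++ [x]) = x := by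
  simp [pvLast]

theorem pvDiffs_append_singleton (l : List Int) (h : l ≠ []) (x : Int) :
    pvDiffs (l ++ [x]) = pvDiffs l ++ [x - pvLast l] := by
  induction l with
  | nil => simp at h
  | cons y ys ih =>
    cases ys with
    | nil => simp [pvDiffs, pvLast]
    | cons z zs =>
      simp only [pvDiffs, List.cons_append, List.tail_cons, List.zip_cons_cons,
        List.map_cons] at ih ⊢
      rw [ih (by simp)]
      simp [pvLast, List.getLast?_cons_cons]

theorem pvStepA_of_bound (a : List Int) (n : Int) (s : Int × Int) (hb : pvBound a n = true) :
    pvStepA a s n = (if 1 > s.1 then 1 else s.1, 1) := by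
  unfold pvStepA
  unfold pvBound at hb
  simp only [ne_eq, decide_not, Bool.not_eq_eq_eq_not, Bool.not_true,
    decide_eq_false_iff_not] at hb
  simp [hb]

theorem pvStepA_of_not_bound (a : List Int) (n : Int) (s : Int × Int) (hb : ¬ pvBound a n = true) :
    pvStepA a s n = (if s.2 + 1 > s.1 then s.2 + 1 else s.1, s.2 + 1) := by
  have h : PySem.List.pyGetD a n 0 = PySem.List.pyGetD a (n - 1) 0 := by
    by_contra h
    exact hb (by simp [pvBound, h])
  simp [pvStepA, h]

-- the invariant carried by A's inner loop, phrased against B's boundary list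
theorem pvInvariant (a : List Int) (n : Int) (hn : 1 ≤ n) :
    let s := (PySem.List.pyRange 1 n 1).foldl (pvStepA a) (1, 1)
    let bs := 0 :: (PySem.List.pyRange 1 n 1).filter (pvBound a)
    s.2 = n - pvLast bs ∧
    s.1 = max ((pvDiffs bs).foldl max 1) s.2 ∧ 1 ≤ s.1 ∧ 1 ≤ s.2 := by
  induction n, hn using Int.le_induction with
  | base => simp [PySem.List.pyRange_one_eq_nil, pvDiffs, pvLast]
  | succ n hn ih =>
    rw [PySem.List.pyRange_one_succ_right (by omega)]
    obtain ⟨ih1, ih2, ih3, ih4⟩ := ih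
    simp only [List.foldl_append, List.foldl_cons, List.foldl_nil, List.filter_append,
      List.filter_cons, List.filter_nil]
    by_cases hb : pvBound a n
    · -- value changes at n: new boundary, run resets to 1
      simp only [hb, if_pos]
      rw [pvStepA_of_bound a n _ hb]
      have hlast : pvLast (0 :: ((PySem.List.pyRange 1 n 1).filter (pvBound a) ++ [n])) = n := by
        rw [← List.cons_append]; exact pvLast_concat _ n
      have hdiffs : pvDiffs (0 :: ((PySem.List.pyRange 1 n 1).filter (pvBound a) ++ [n])) =
          pvDiffs (0 :: (PySem.List.pyRange 1 n 1).filter (pvBound a)) ++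
            [n - pvLast (0 :: (PySem.List.pyRange 1 n 1).filter (pvBound a))] := by
        rw [← List.cons_append]
        exact pvDiffs_append_singleton _ (by simp) n
      rw [hlast, hdiffs, List.foldl_append]
      simp only [List.foldl_cons, List.foldl_nil]
      split_ifs with h1 <;> constructor <;> omega
    · -- same value at n: run extends by 1, boundaries unchanged
      simp only [hb, if_neg, Bool.false_eq_true, not_false_iff, List.append_nil]
      rw [pvStepA_of_not_bound a n _ hb]
      split_ifs with h1 <;> (refine ⟨by omega, ?_, by omega, by omega⟩) <;> simp only <;> omega

-- one test case: A's inner loop equals B's boundary computation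
theorem pvCase_eq (n : Int) (a : List Int) :
    ((PySem.List.pyRange 1 n 1).foldl (pvStepA a) (1, 1)).1 = pvCaseB n a := by
  by_cases hn : 1 ≤ n
  · obtain ⟨h1, h2, h3, h4⟩ := pvInvariant a n hn
    unfold pvCaseB
    have hdiffs : pvDiffs (0 :: ((PySem.List.pyRange 1 n 1).filter (pvBound a) ++ [n])) =
        pvDiffs (0 :: (PySem.List.pyRange 1 n 1).filter (pvBound a)) ++
          [n - pvLast (0 :: (PySem.List.pyRange 1 n 1).filter (pvBound a))] := by
      rw [← List.cons_append]
      exact pvDiffs_append_singleton _ (by simp) n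
    simp only [hdiffs, List.foldl_append, List.foldl_cons, List.foldl_nil]
    omega
  · rw [PySem.List.pyRange_one_eq_nil (by omega)]
    simp [pvCaseB, pvDiffs, PySem.List.pyRange_one_eq_nil (by omega : n ≤ 1)]
    omega

-- ===== VERDICT (by name: the statement is the Claim_ definition above) =====
theorem minimum_colors_needed_spec : Claim_equal_minimum_colors_needed := by
  intro tc _ _
  unfold Spec_minimum_colors_needed minimum_colors_needed minimum_colors_needed_alt
  rw [PySem.List.foldl_append_singleton_eq_map]
  exact List.map_congr_left (fun na _ => pvCase_eq na.1 na.2)
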